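-- pv_equiv track=rewrite | github.com/AkalyaAsokan/BGP-Hijacks | main.py | count_attacks
-- ===== SOURCE A (Python) =====
-- def count_attacks(attack_list):
--     attack_times = {'{}_attacks_3'.format(attack_list[0][2]): 0, '{}_attacks_1'.format(attack_list[0][2]): 0, '{}_attacks_2'.format(attack_list[0][2]): 0}
--
--     count = 0
--     for lst in attack_list:
--         count = count + lst[0]
--         if(count > 2000):
--             attack_times['{}_attacks_2'.format(attack_list[0][2])] += 1
--             attack_times['{}_attacks_3'.format(attack_list[0][2])] += 1
--         if(count > 3000):
--             attack_times['{}_attacks_3'.format(attack_list[0][2])] += 1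
--         else:
--             attack_times['{}_attacks_1'.format(attack_list[0][2])] += 1
--             attack_times['{}_attacks_2'.format(attack_list[0][2])] += 1
--             attack_times['{}_attacks_3'.format(attack_list[0][2])] += 1
--     return attack_times
-- ===== SOURCE B (Python) =====
-- def count_attacks(attack_list):
--     key = attack_list[0][2]
--     sums = []
--     total = 0
--     for lst in attack_list:
--         total += lst[0]
--         sums.append(total)
--     over2 = sum(1 for s in sums if s > 2000)
--     upto3 = sum(1 for s in sums if s <= 3000)
--     return {key + '_attacks_3': len(sums) + over2,
--             key + '_attacks_1': upto3,
--             key + '_attacks_2': upto3 + over2}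
-- ===== Notes on version B (the rewrite author's own statement) =====
-- stated objective: alternative
-- what changed: Staged computation instead of per-element branching: B first materializes the list of prefix sums, then derives the three dict values from two independent threshold counts (|{s>2000}| and |{s<=3000}|) via the identities attacks_1=|{s<=3000}|, attacks_2=|{s<=3000}|+|{s>2000}|, attacks_3=n+|{s>2000}|.
import Mathlib
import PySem

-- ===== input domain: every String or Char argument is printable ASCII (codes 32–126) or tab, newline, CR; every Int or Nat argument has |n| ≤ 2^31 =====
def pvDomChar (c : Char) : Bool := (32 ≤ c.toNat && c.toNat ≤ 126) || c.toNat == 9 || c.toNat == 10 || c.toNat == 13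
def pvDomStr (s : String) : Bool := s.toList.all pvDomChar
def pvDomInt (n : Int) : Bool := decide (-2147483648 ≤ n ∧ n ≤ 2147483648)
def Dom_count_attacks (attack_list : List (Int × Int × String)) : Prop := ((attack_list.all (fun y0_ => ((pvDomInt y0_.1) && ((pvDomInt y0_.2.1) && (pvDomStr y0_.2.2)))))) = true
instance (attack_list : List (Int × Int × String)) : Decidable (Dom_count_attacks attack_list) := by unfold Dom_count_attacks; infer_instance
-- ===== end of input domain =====

-- B stages the work: it first materializes the prefix-sum list, then derives the three
-- dict values from two threshold counts via closed identities; alternative decomposition, same cost.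

-- ===== PORT A =====
-- A's dict: keys always present when '+= 1' runs, so modify with default 0 is exact.
def count_attacks (attack_list : List (Int × Int × String)) : List (String × Int) :=
  match attack_list with
  | [] => []   -- Python raises IndexError here; excluded by Pre_count_attacks
  | hd :: _ =>
    let p := hd.2.2
    let d0 : PySem.Dict String Int :=
      ((PySem.Dict.empty.insert (p ++ "_attacks_3") 0).insert (p ++ "_attacks_1") 0).insert (p ++ "_attacks_2") 0
    let r := attack_list.foldl (fun (st : PySem.Dict String Int × Int) lst =>
      let count := st.2 + lst.1
      let d := st.1
      let d := if count > 2000 then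
          (d.modify (p ++ "_attacks_2") 0 (· + 1)).modify (p ++ "_attacks_3") 0 (· + 1)
        else d
      let d := if count > 3000 then d.modify (p ++ "_attacks_3") 0 (· + 1)
        else (((d.modify (p ++ "_attacks_1") 0 (· + 1)).modify (p ++ "_attacks_2") 0 (· + 1)).modify (p ++ "_attacks_3") 0 (· + 1))
      (d, count)) (d0, 0)
    r.1.items

-- ===== PORT B =====
def count_attacks_alt (attack_list : List (Int × Int × String)) : List (String × Int) :=
  match attack_list with
  | [] => []   -- B's Python also raises IndexError here; excluded by Pre_count_attacks
  | hd :: _ =>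
    let key := hd.2.2
    let sums := (attack_list.foldl (fun (st : List Int × Int) lst =>
        let total := st.2 + lst.1
        (st.1 ++ [total], total)) ([], 0)).1
    let over2 : Int := ((sums.filter (fun s => decide (s > 2000))).length : Int)
    let upto3 : Int := ((sums.filter (fun s => decide (s ≤ 3000))).length : Int)
    [(key ++ "_attacks_3", (sums.length : Int) + over2),
     (key ++ "_attacks_1", upto3),
     (key ++ "_attacks_2", upto3 + over2)]

-- ===== PRECONDITION & SPEC =====
-- A raises IndexError on the empty list (attack_list[0]); B raises there too.
def Pre_count_attacks (attack_list : List (Int × Int × String)) : Prop := attack_list ≠ []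
instance (attack_list : List (Int × Int × String)) : Decidable (Pre_count_attacks attack_list) := by unfold Pre_count_attacks; infer_instance
def pvWitness_count_attacks : (List (Int × Int × String)) := [(1500, 0, "AS1"), (1500, 1, "AS1")]

def Spec_count_attacks (attack_list : List (Int × Int × String)) (out : List (String × Int)) : Prop := out = count_attacks_alt attack_list
instance (attack_list : List (Int × Int × String)) (out : List (String × Int)) : Decidable (Spec_count_attacks attack_list out) := by unfold Spec_count_attacks; infer_instance

-- ===== CLAIM (what is proved, stated in full; the proofs are below) =====
def Claim_equal_count_attacks : Prop := ∀ (attack_list : List (Int × Int × String)), Dom_count_attacks attack_list → Pre_count_attacks attack_list → Spec_count_attacks attack_list (count_attacks attack_list)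

-- ===== LEMMAS AND PROOFS =====

-- the running prefix sums starting from accumulator c
def pfx (c : Int) : List (Int × Int × String) → List Int
  | [] => []
  | x :: xs => (c + x.1) :: pfx (c + x.1) xs

lemma append_right_ne (p : String) {a b : String} (h : a ≠ b) : p ++ a ≠ p ++ b := by
  intro he
  apply h
  have h2 := congrArg String.toList he
  simp only [String.toList_append] at h2
  have h3 := List.append_cancel_left h2
  have := congrArg String.ofList h3
  simpa using this

lemma keys_modify_mem {ν : Type} (d : PySem.Dict String ν) (k : String) (d0 : ν) (f : ν → ν)
    (h : k ∈ d.keys) : (d.modify k d0 f).keys = d.keys := by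
  rw [PySem.Dict.keys_modify, PySem.Dict.keys_insert_of_contains]
  exact (PySem.Dict.contains_iff_mem_keys d k).mpr h

lemma keys_ne_31 (p : String) : p ++ "_attacks_3" ≠ p ++ "_attacks_1" :=
  append_right_ne p (by decide)
lemma keys_ne_32 (p : String) : p ++ "_attacks_3" ≠ p ++ "_attacks_2" :=
  append_right_ne p (by decide)
lemma keys_ne_12 (p : String) : p ++ "_attacks_1" ≠ p ++ "_attacks_2" :=
  append_right_ne p (by decide)

-- B's first stage: the fold materializes exactly the prefix sums
lemma bfold_eq (xs : List (Int × Int × String)) :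
    ∀ (acc : List Int) (c : Int),
    (xs.foldl (fun (st : List Int × Int) lst =>
        let total := st.2 + lst.1
        (st.1 ++ [total], total)) (acc, c)).1 = acc ++ pfx c xs := by
  induction xs with
  | nil => intro acc c; simp [pfx]
  | cons x xs ih =>
    intro acc c
    simpa [pfx, List.foldl] using ih (acc ++ [c + x.1]) (c + x.1)

-- loop invariant: A's dict fold computed from the threshold counts of the prefix sums
lemma loop_eq (p : String) (xs : List (Int × Int × String)) :
    ∀ (c v1 v2 v3 : Int) (d : PySem.Dict String Int),
    d.keys = [p ++ "_attacks_3", p ++ "_attacks_1", p ++ "_attacks_2"] →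
    d.getD (p ++ "_attacks_1") 0 = v1 →
    d.getD (p ++ "_attacks_2") 0 = v2 →
    d.getD (p ++ "_attacks_3") 0 = v3 →
    (xs.foldl (fun (st : PySem.Dict String Int × Int) lst =>
      let count := st.2 + lst.1
      let d := st.1
      let d := if count > 2000 then
          (d.modify (p ++ "_attacks_2") 0 (· + 1)).modify (p ++ "_attacks_3") 0 (· + 1)
        else d
      let d := if count > 3000 then d.modify (p ++ "_attacks_3") 0 (· + 1)
        else (((d.modify (p ++ "_attacks_1") 0 (· + 1)).modify (p ++ "_attacks_2") 0 (· + 1)).modify (p ++ "_attacks_3") 0 (· + 1))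
      (d, count)) (d, c)).1.items =
    [(p ++ "_attacks_3", v3 + ((pfx c xs).length : Int) + (((pfx c xs).filter (fun s => decide (s > 2000))).length : Int)),
     (p ++ "_attacks_1", v1 + (((pfx c xs).filter (fun s => decide (s ≤ 3000))).length : Int)),
     (p ++ "_attacks_2", v2 + (((pfx c xs).filter (fun s => decide (s ≤ 3000))).length : Int) + (((pfx c xs).filter (fun s => decide (s > 2000))).length : Int))] := by
  induction xs with
  | nil =>
    intro c v1 v2 v3 d hk h1 h2 h3
    have hnd : d.keys.Nodup := by
      rw [hk]
      simp [List.nodup_cons, keys_ne_31 p, keys_ne_32 p, keys_ne_12 p]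
    simp only [List.foldl, pfx]
    rw [PySem.Dict.items_eq_map_keys d hnd 0, hk]
    simp only [List.map]
    rw [h1, h2, h3]
    simp
  | cons x xs ih =>
    intro c v1 v2 v3 d hk h1 h2 h3
    have m1 : (p ++ "_attacks_1") ∈ d.keys := by rw [hk]; simp
    have m2 : (p ++ "_attacks_2") ∈ d.keys := by rw [hk]; simp
    have m3 : (p ++ "_attacks_3") ∈ d.keys := by rw [hk]; simp
    by_cases hgt3 : c + x.1 > 3000
    · have hgt2 : c + x.1 > 2000 := by omega
      have hkch : ([p ++ "_attacks_2", p ++ "_attacks_3", p ++ "_attacks_3"].foldl (fun d x => d.modify x 0 (· + 1)) d).keys = d.keys := by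
        simp only [List.foldl]
        rw [keys_modify_mem, keys_modify_mem, keys_modify_mem] <;>
          simp [PySem.Dict.mem_keys_insert, PySem.Dict.keys_modify, hk]
      have h1' : ([p ++ "_attacks_2", p ++ "_attacks_3", p ++ "_attacks_3"].foldl (fun d x => d.modify x 0 (· + 1)) d).getD (p ++ "_attacks_1") 0 = v1 := by
        rw [PySem.Dict.getD_foldl_modify_add_one]
        simp [List.count_cons, keys_ne_31 p, keys_ne_32 p, keys_ne_12 p, (keys_ne_31 p).symm, (keys_ne_32 p).symm, (keys_ne_12 p).symm, h1]
      have h2' : ([p ++ "_attacks_2", p ++ "_attacks_3", p ++ "_attacks_3"].foldl (fun d x => d.modify x 0 (· + 1)) d).getD (p ++ "_attacks_2") 0 = v2 + 1 := by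
        rw [PySem.Dict.getD_foldl_modify_add_one]
        simp [List.count_cons, keys_ne_31 p, keys_ne_32 p, keys_ne_12 p, (keys_ne_31 p).symm, (keys_ne_32 p).symm, (keys_ne_12 p).symm, h2]
      have h3' : ([p ++ "_attacks_2", p ++ "_attacks_3", p ++ "_attacks_3"].foldl (fun d x => d.modify x 0 (· + 1)) d).getD (p ++ "_attacks_3") 0 = v3 + 2 := by
        rw [PySem.Dict.getD_foldl_modify_add_one]
        simp [List.count_cons, keys_ne_31 p, keys_ne_32 p, keys_ne_12 p, (keys_ne_31 p).symm, (keys_ne_32 p).symm, (keys_ne_12 p).symm, h3]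
      have hih := ih (c + x.1) v1 (v2 + 1) (v3 + 2) _ (hkch.trans hk) h1' h2' h3'
      simp only [List.foldl, if_pos hgt2, if_pos hgt3] at hih ⊢
      rw [hih]
      simp only [pfx, List.filter_cons, decide_eq_true_eq, if_pos hgt2,
        if_neg (show ¬ (c + x.1 ≤ 3000) by omega), List.length_cons]
      and_intros <;> first | rfl | (push_cast; ring_nf) | omega
    · by_cases hgt2 : c + x.1 > 2000
      · have hkch : ([p ++ "_attacks_2", p ++ "_attacks_3", p ++ "_attacks_1", p ++ "_attacks_2", p ++ "_attacks_3"].foldl (fun d x => d.modify x 0 (· + 1)) d).keys = d.keys := by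
          simp only [List.foldl]
          rw [keys_modify_mem, keys_modify_mem, keys_modify_mem, keys_modify_mem, keys_modify_mem] <;>
            simp [PySem.Dict.mem_keys_insert, PySem.Dict.keys_modify, hk]
        have h1' : ([p ++ "_attacks_2", p ++ "_attacks_3", p ++ "_attacks_1", p ++ "_attacks_2", p ++ "_attacks_3"].foldl (fun d x => d.modify x 0 (· + 1)) d).getD (p ++ "_attacks_1") 0 = v1 + 1 := by
          rw [PySem.Dict.getD_foldl_modify_add_one]
          simp [List.count_cons, keys_ne_31 p, keys_ne_32 p, keys_ne_12 p, (keys_ne_31 p).symm, (keys_ne_32 p).symm, (keys_ne_12 p).symm, h1]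
        have h2' : ([p ++ "_attacks_2", p ++ "_attacks_3", p ++ "_attacks_1", p ++ "_attacks_2", p ++ "_attacks_3"].foldl (fun d x => d.modify x 0 (· + 1)) d).getD (p ++ "_attacks_2") 0 = v2 + 2 := by
          rw [PySem.Dict.getD_foldl_modify_add_one]
          simp [List.count_cons, keys_ne_31 p, keys_ne_32 p, keys_ne_12 p, (keys_ne_31 p).symm, (keys_ne_32 p).symm, (keys_ne_12 p).symm, h2]
        have h3' : ([p ++ "_attacks_2", p ++ "_attacks_3", p ++ "_attacks_1", p ++ "_attacks_2", p ++ "_attacks_3"].foldl (fun d x => d.modify x 0 (· + 1)) d).getD (p ++ "_attacks_3") 0 = v3 + 2 := by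
          rw [PySem.Dict.getD_foldl_modify_add_one]
          simp [List.count_cons, keys_ne_31 p, keys_ne_32 p, keys_ne_12 p, (keys_ne_31 p).symm, (keys_ne_32 p).symm, (keys_ne_12 p).symm, h3]
        have hih := ih (c + x.1) (v1 + 1) (v2 + 2) (v3 + 2) _ (hkch.trans hk) h1' h2' h3'
        simp only [List.foldl, if_pos hgt2, if_neg hgt3] at hih ⊢
        rw [hih]
        simp only [pfx, List.filter_cons, decide_eq_true_eq, if_pos hgt2,
          if_pos (show c + x.1 ≤ 3000 by omega), List.length_cons]
        and_intros <;> first | rfl | (push_cast; ring_nf) | omega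
      · have hkch : ([p ++ "_attacks_1", p ++ "_attacks_2", p ++ "_attacks_3"].foldl (fun d x => d.modify x 0 (· + 1)) d).keys = d.keys := by
          simp only [List.foldl]
          rw [keys_modify_mem, keys_modify_mem, keys_modify_mem] <;>
            simp [PySem.Dict.mem_keys_insert, PySem.Dict.keys_modify, hk]
        have h1' : ([p ++ "_attacks_1", p ++ "_attacks_2", p ++ "_attacks_3"].foldl (fun d x => d.modify x 0 (· + 1)) d).getD (p ++ "_attacks_1") 0 = v1 + 1 := by
          rw [PySem.Dict.getD_foldl_modify_add_one]
          simp [List.count_cons, keys_ne_31 p, keys_ne_32 p, keys_ne_12 p, (keys_ne_31 p).symm, (keys_ne_32 p).symm, (keys_ne_12 p).symm, h1]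
        have h2' : ([p ++ "_attacks_1", p ++ "_attacks_2", p ++ "_attacks_3"].foldl (fun d x => d.modify x 0 (· + 1)) d).getD (p ++ "_attacks_2") 0 = v2 + 1 := by
          rw [PySem.Dict.getD_foldl_modify_add_one]
          simp [List.count_cons, keys_ne_31 p, keys_ne_32 p, keys_ne_12 p, (keys_ne_31 p).symm, (keys_ne_32 p).symm, (keys_ne_12 p).symm, h2]
        have h3' : ([p ++ "_attacks_1", p ++ "_attacks_2", p ++ "_attacks_3"].foldl (fun d x => d.modify x 0 (· + 1)) d).getD (p ++ "_attacks_3") 0 = v3 + 1 := by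
          rw [PySem.Dict.getD_foldl_modify_add_one]
          simp [List.count_cons, keys_ne_31 p, keys_ne_32 p, keys_ne_12 p, (keys_ne_31 p).symm, (keys_ne_32 p).symm, (keys_ne_12 p).symm, h3]
        have hih := ih (c + x.1) (v1 + 1) (v2 + 1) (v3 + 1) _ (hkch.trans hk) h1' h2' h3'
        simp only [List.foldl, if_neg hgt2, if_neg hgt3] at hih ⊢
        rw [hih]
        simp only [pfx, List.filter_cons, decide_eq_true_eq, if_neg hgt2,
          if_pos (show c + x.1 ≤ 3000 by omega), List.length_cons]
        and_intros <;> first | rfl | (push_cast; ring_nf) | omega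

theorem count_attacks_spec : Claim_equal_count_attacks := by
  intro attack_list hdom hpre
  unfold Spec_count_attacks
  match attack_list with
  | [] => exact absurd rfl hpre
  | hd :: tl =>
    unfold count_attacks count_attacks_alt
    simp only
    have hkeys : (((PySem.Dict.empty.insert (hd.2.2 ++ "_attacks_3") (0:Int)).insert (hd.2.2 ++ "_attacks_1") 0).insert (hd.2.2 ++ "_attacks_2") 0).keys = [hd.2.2 ++ "_attacks_3", hd.2.2 ++ "_attacks_1", hd.2.2 ++ "_attacks_2"] := by
      rw [PySem.Dict.keys_insert_of_not_contains, PySem.Dict.keys_insert_of_not_contains, PySem.Dict.keys_insert_of_not_contains, PySem.Dict.keys_empty] <;>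
        simp [PySem.Dict.contains_insert, PySem.Dict.contains_empty, keys_ne_31 hd.2.2, keys_ne_32 hd.2.2, keys_ne_12 hd.2.2, (keys_ne_31 hd.2.2).symm, (keys_ne_32 hd.2.2).symm, (keys_ne_12 hd.2.2).symm]
    have hg1 : (((PySem.Dict.empty.insert (hd.2.2 ++ "_attacks_3") (0:Int)).insert (hd.2.2 ++ "_attacks_1") 0).insert (hd.2.2 ++ "_attacks_2") 0).getD (hd.2.2 ++ "_attacks_1") 0 = 0 := by
      simp [PySem.Dict.getD_insert, keys_ne_12 hd.2.2, (keys_ne_12 hd.2.2).symm]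
    have hg2 : (((PySem.Dict.empty.insert (hd.2.2 ++ "_attacks_3") (0:Int)).insert (hd.2.2 ++ "_attacks_1") 0).insert (hd.2.2 ++ "_attacks_2") 0).getD (hd.2.2 ++ "_attacks_2") 0 = 0 := by
      simp [PySem.Dict.getD_insert]
    have hg3 : (((PySem.Dict.empty.insert (hd.2.2 ++ "_attacks_3") (0:Int)).insert (hd.2.2 ++ "_attacks_1") 0).insert (hd.2.2 ++ "_attacks_2") 0).getD (hd.2.2 ++ "_attacks_3") 0 = 0 := by
      simp [PySem.Dict.getD_insert, keys_ne_31 hd.2.2, keys_ne_32 hd.2.2, (keys_ne_31 hd.2.2).symm, (keys_ne_32 hd.2.2).symm]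
    have hq := loop_eq hd.2.2 (hd :: tl) 0 0 0 0 _ hkeys hg1 hg2 hg3
    rw [hq, bfold_eq (hd :: tl) [] 0]
    simp
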